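-- pv_equiv track=rewrite | github.com/marcelolazzari/Fancy2048 | app.py | _get_monotonicity_score
-- ===== SOURCE A (Python) =====
-- from typing import Dict, List, Optional, Tuple, Any
--
-- def _get_monotonicity_score(array: List[int]) -> float:
--     """Get monotonicity score for an array"""
--     increasing = 0
--     decreasing = 0
--
--     for i in range(len(array) - 1):
--         current = 0 if array[i] <= 0 else (array[i].bit_length() - 1)
--         next_val = 0 if array[i + 1] <= 0 else (array[i + 1].bit_length() - 1)
--
--         if current > next_val:
--             decreasing += current - next_val
--         elif current < next_val:
--             increasing += next_val - current
--
--     return -min(increasing, decreasing)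
-- ===== SOURCE B (Python) =====
-- def _get_monotonicity_score(array):
--     logs = [0 if x <= 0 else x.bit_length() - 1 for x in array]
--     if len(logs) < 2:
--         return 0
--     total_var = sum(abs(b - a) for a, b in zip(logs, logs[1:]))
--     endpoint = abs(logs[-1] - logs[0])
--     return -((total_var - endpoint) // 2)
-- ===== Notes on version B (the rewrite author's own statement) =====
-- stated objective: alternative
-- what changed: Replaces A's twin-accumulator (increasing/decreasing) index loop with a total-variation sum over adjacent log-value differences plus the closed form min(inc,dec) = (totalVar - |L[-1]-L[0]|)//2, exploiting that inc+dec is the total variation and inc-dec telescopes to the endpoint difference.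
import Mathlib
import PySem

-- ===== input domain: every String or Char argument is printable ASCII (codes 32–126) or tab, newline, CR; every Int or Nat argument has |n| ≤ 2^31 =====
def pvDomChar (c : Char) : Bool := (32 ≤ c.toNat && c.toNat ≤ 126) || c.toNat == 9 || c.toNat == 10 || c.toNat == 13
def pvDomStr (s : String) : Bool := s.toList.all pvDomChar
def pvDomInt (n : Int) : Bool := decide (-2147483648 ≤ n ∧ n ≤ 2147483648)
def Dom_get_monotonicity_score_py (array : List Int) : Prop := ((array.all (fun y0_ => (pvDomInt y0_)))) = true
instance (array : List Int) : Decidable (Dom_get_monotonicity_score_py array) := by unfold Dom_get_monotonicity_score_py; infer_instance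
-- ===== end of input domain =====

-- B replaces A's twin-accumulator index loop by a total-variation sum over adjacent
-- log-value differences plus the closed form min(inc,dec) = (totalVar - |L_last - L_first|)/2
-- (objective: alternative decomposition, same O(n) cost).

-- ===== PORT A =====
def get_monotonicity_score_py (array : List Int) : Int :=
  let st := (PySem.List.pyRange 0 ((array.length : Int) - 1) 1).foldl
    (fun (st : Int × Int) i =>
      let current : Int :=
        if PySem.List.pyGetD array i 0 ≤ 0 then 0
        else (PySem.Int.bitLength (PySem.List.pyGetD array i 0) : Int) - 1
      let next_val : Int :=
        if PySem.List.pyGetD array (i + 1) 0 ≤ 0 then 0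
        else (PySem.Int.bitLength (PySem.List.pyGetD array (i + 1) 0) : Int) - 1
      if current > next_val then (st.1, st.2 + (current - next_val))
      else if current < next_val then (st.1 + (next_val - current), st.2)
      else st) ((0 : Int), (0 : Int));
  -(min st.1 st.2)

-- ===== PORT B =====
def get_monotonicity_score_py_alt (array : List Int) : Int :=
  let logs := array.map (fun x =>
    if x ≤ 0 then (0 : Int) else (PySem.Int.bitLength x : Int) - 1)
  if logs.length < 2 then 0
  else
    let total_var := ((logs.zip logs.tail).map (fun p => |p.2 - p.1|)).sum
    let endpoint := |PySem.List.pyGetD logs (-1) 0 - PySem.List.pyGetD logs 0 0|;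
    -(PySem.Int.floordiv (total_var - endpoint) 2)

-- ===== PRECONDITION & SPEC =====
def Spec_get_monotonicity_score_py (array : List Int) (out : Int) : Prop := out = get_monotonicity_score_py_alt array
instance (array : List Int) (out : Int) : Decidable (Spec_get_monotonicity_score_py array out) := by unfold Spec_get_monotonicity_score_py; infer_instance

-- ===== CLAIM (what is proved, stated in full; the proofs are below) =====
def Claim_equal_get_monotonicity_score_py : Prop := ∀ (array : List Int), Dom_get_monotonicity_score_py array → Spec_get_monotonicity_score_py array (get_monotonicity_score_py array)

-- ===== LEMMAS AND PROOFS =====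

-- the log value both programs assign to an entry
def pvF (x : Int) : Int := if x ≤ 0 then 0 else (PySem.Int.bitLength x : Int) - 1

-- last element of a :: l
def pvLst (a : Int) : List Int → Int
  | [] => a
  | b :: t => pvLst b t

-- total variation of the log values along a :: l
def pvTV : Int → List Int → Int
  | _, [] => 0
  | a, b :: t => |pvF b - pvF a| + pvTV b t

-- one step of A's loop
def pvStep (st : Int × Int) (x y : Int) : Int × Int :=
  if pvF x > pvF y then (st.1, st.2 + (pvF x - pvF y))
  else if pvF x < pvF y then (st.1 + (pvF y - pvF x), st.2)
  else st

lemma pvStep_sum (st : Int × Int) (x y : Int) :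
    (pvStep st x y).1 + (pvStep st x y).2 = st.1 + st.2 + |pvF y - pvF x| := by
  unfold pvStep
  rcases abs_cases (pvF y - pvF x) with ⟨h, h'⟩ | ⟨h, h'⟩ <;> split_ifs <;> (try simp) <;> omega

lemma pvStep_diff (st : Int × Int) (x y : Int) :
    (pvStep st x y).1 - (pvStep st x y).2 = st.1 - st.2 + (pvF y - pvF x) := by
  unfold pvStep
  split_ifs <;> (try simp) <;> omega

lemma pvStep_nonneg (st : Int × Int) (x y : Int) (h1 : 0 ≤ st.1) (h2 : 0 ≤ st.2) :
    0 ≤ (pvStep st x y).1 ∧ 0 ≤ (pvStep st x y).2 := by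
  unfold pvStep
  split_ifs <;> (try simp) <;> omega

-- invariant of A's pair fold: sum of the accumulators is the total variation,
-- their difference telescopes to the endpoint difference, both stay nonnegative
lemma loopA (l : List Int) : ∀ (a : Int) (st : Int × Int),
    (((a :: l).zip l).foldl (fun st (p : Int × Int) => pvStep st p.1 p.2) st).1
      + (((a :: l).zip l).foldl (fun st (p : Int × Int) => pvStep st p.1 p.2) st).2
      = st.1 + st.2 + pvTV a l
    ∧ (((a :: l).zip l).foldl (fun st (p : Int × Int) => pvStep st p.1 p.2) st).1
      - (((a :: l).zip l).foldl (fun st (p : Int × Int) => pvStep st p.1 p.2) st).2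
      = st.1 - st.2 + (pvF (pvLst a l) - pvF a)
    ∧ (0 ≤ st.1 → 0 ≤ st.2 →
       0 ≤ (((a :: l).zip l).foldl (fun st (p : Int × Int) => pvStep st p.1 p.2) st).1
       ∧ 0 ≤ (((a :: l).zip l).foldl (fun st (p : Int × Int) => pvStep st p.1 p.2) st).2) := by
  induction l with
  | nil => intro a st; simp [pvTV, pvLst]; tauto
  | cons b t ih =>
    intro a st
    simp only [List.zip_cons_cons, List.foldl_cons]
    obtain ⟨h1, h2, h3⟩ := ih b (pvStep st a b)
    have hs := pvStep_sum st a b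
    have hd := pvStep_diff st a b
    have hn := pvStep_nonneg st a b
    simp only [pvTV, pvLst]
    refine ⟨by linarith, by linarith, fun p1 p2 => ?_⟩
    exact h3 (hn p1 p2).1 (hn p1 p2).2

-- index fold over range(len-1) = fold over adjacent pairs
lemma foldl_range_pairs {σ : Type} (g : σ → Int → Int → σ) :
    ∀ (l : List Int) (init : σ),
    (List.range (l.length - 1)).foldl (fun st k => g st (l.getD k 0) (l.getD (k + 1) 0)) init
      = (l.zip l.tail).foldl (fun st p => g st p.1 p.2) init := by
  intro l
  induction l with
  | nil => intro init; rfl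
  | cons a l ih =>
    cases l with
    | nil => intro init; rfl
    | cons b t =>
      intro init
      have hlen : (a :: b :: t).length - 1 = ((b :: t).length - 1) + 1 := by
        simp [List.length]
      rw [hlen, List.range_succ_eq_map, List.foldl_cons, List.foldl_map]
      have hbody : (fun (st : σ) (k : Nat) =>
            g st ((a :: b :: t).getD (Nat.succ k) 0) ((a :: b :: t).getD (Nat.succ k + 1) 0))
          = (fun st k => g st ((b :: t).getD k 0) ((b :: t).getD (k + 1) 0)) := by
        funext st k
        simp
      simp only [hbody]
      rw [ih]
      simp [List.zip_cons_cons]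

-- B's total-variation sum equals pvTV
lemma sum_zip_tv : ∀ (l : List Int) (a : Int),
    ((((a :: l).map pvF).zip ((a :: l).map pvF).tail).map (fun p => |p.2 - p.1|)).sum
      = pvTV a l := by
  intro l
  induction l with
  | nil => intro a; simp [pvTV]
  | cons b t ih => intro a; simp only [List.map_cons, List.tail_cons, List.zip_cons_cons,
      List.map_cons, List.sum_cons, pvTV] at *; rw [← ih b]

lemma lst_map : ∀ (l : List Int) (a : Int),
    PySem.List.pyGetD ((a :: l).map pvF) (-1) 0 = pvF (pvLst a l) := by
  intro l
  induction l with
  | nil =>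
    intro a
    rw [PySem.List.pyGetD_neg_one ((a :: ([] : List Int)).map pvF) 0 (by simp)]
    simp [pvLst]
  | cons b t ih =>
    intro a
    have h2 : (List.map pvF (a :: b :: t)).getLast (by simp)
        = (List.map pvF (b :: t)).getLast (by simp) := List.getLast_cons (by simp)
    rw [PySem.List.pyGetD_neg_one (List.map pvF (a :: b :: t)) 0 (by simp), h2,
      ← PySem.List.pyGetD_neg_one (List.map pvF (b :: t)) 0 (by simp), ih b]
    rfl

lemma floordiv_two_mul (m : Int) : PySem.Int.floordiv (2 * m) 2 = m := by
  rw [PySem.Int.floordiv_eq_ediv_of_pos (by omega)]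
  omega

-- ===== VERDICT (by name: the statement is the Claim_ definition above) =====
def pvFold (a : Int) (l : List Int) : Int × Int :=
  ((a :: l).zip l).foldl (fun st (p : Int × Int) => pvStep st p.1 p.2) (0, 0)

-- A's pyRange index fold, with pvStep body, as the pair fold
lemma foldl_pyRange_pairs (l : List Int) (init : Int × Int) :
    (PySem.List.pyRange 0 ((l.length : Int) - 1) 1).foldl
      (fun st i => pvStep st (PySem.List.pyGetD l i 0) (PySem.List.pyGetD l (i + 1) 0)) init
    = (l.zip l.tail).foldl (fun st (p : Int × Int) => pvStep st p.1 p.2) init := by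
  rw [PySem.List.pyRange_one, List.foldl_map]
  have hbody : (fun (st : Int × Int) (k : Nat) =>
        pvStep st (PySem.List.pyGetD l ((0 : Int) + ↑k) 0)
          (PySem.List.pyGetD l ((0 : Int) + ↑k + 1) 0))
      = (fun st k => pvStep st (l.getD k 0) (l.getD (k + 1) 0)) := by
    funext st k
    have h1 : ((0 : Int) + (k : Int)) = ((k : Nat) : Int) := by ring
    have h2 : ((k : Int) + 1) = (((k + 1 : Nat)) : Int) := by push_cast; ring
    rw [h1, h2, PySem.List.pyGetD_natCast, PySem.List.pyGetD_natCast]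
  have hn : (((l.length : Int) - 1) - 0).toNat = l.length - 1 := by omega
  rw [hbody, hn]
  exact foldl_range_pairs (fun st x y => pvStep st x y) l init

lemma A_eq (a b : Int) (t : List Int) :
    get_monotonicity_score_py (a :: b :: t)
      = -(min (pvFold a (b :: t)).1 (pvFold a (b :: t)).2) := by
  have hE : get_monotonicity_score_py (a :: b :: t)
      = -(min ((PySem.List.pyRange 0 (((a :: b :: t).length : Int) - 1) 1).foldl
            (fun st i => pvStep st (PySem.List.pyGetD (a :: b :: t) i 0)
              (PySem.List.pyGetD (a :: b :: t) (i + 1) 0)) (0, 0)).1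
          ((PySem.List.pyRange 0 (((a :: b :: t).length : Int) - 1) 1).foldl
            (fun st i => pvStep st (PySem.List.pyGetD (a :: b :: t) i 0)
              (PySem.List.pyGetD (a :: b :: t) (i + 1) 0)) (0, 0)).2) := rfl
  rw [hE, foldl_pyRange_pairs]
  rfl

lemma B_eq (a b : Int) (t : List Int) :
    get_monotonicity_score_py_alt (a :: b :: t)
      = -(PySem.Int.floordiv (pvTV a (b :: t) - |pvF (pvLst a (b :: t)) - pvF a|) 2) := by
  have hF : (fun x => if x ≤ 0 then (0 : Int) else (PySem.Int.bitLength x : Int) - 1) = pvF := rfl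
  simp only [get_monotonicity_score_py_alt, hF]
  rw [if_neg (by simp only [List.length_map, List.length_cons]; omega)]
  rw [sum_zip_tv (b :: t) a, lst_map (b :: t) a]
  have hhead : PySem.List.pyGetD ((a :: b :: t).map pvF) 0 0 = pvF a := by
    simp [List.map_cons, PySem.List.pyGetD_zero_cons]
  rw [hhead]

-- ===== VERDICT (by name: the statement is the Claim_ definition above) =====
theorem get_monotonicity_score_py_spec : Claim_equal_get_monotonicity_score_py := by
  intro array _
  unfold Spec_get_monotonicity_score_py
  cases array with
  | nil => decide
  | cons a l =>
    cases l with
    | nil =>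
      simp [get_monotonicity_score_py, get_monotonicity_score_py_alt]
    | cons b t =>
      rw [A_eq, B_eq]
      obtain ⟨h1, h2, h3⟩ := loopA (b :: t) a (0, 0)
      obtain ⟨p1, p2⟩ := h3 (by simp) (by simp)
      have key : pvTV a (b :: t) - |pvF (pvLst a (b :: t)) - pvF a|
          = 2 * min (pvFold a (b :: t)).1 (pvFold a (b :: t)).2 := by
        rcases abs_cases (pvF (pvLst a (b :: t)) - pvF a) with ⟨hq, _⟩ | ⟨hq, _⟩ <;>
          · unfold pvFold at *
            omega
      rw [key, floordiv_two_mul]
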